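-- pv_equiv track=rewrite | github.com/ineuralworks/pii_redaction_model | redactor.py | format_preserving_mask
-- ===== SOURCE A (Python) =====
-- def format_preserving_mask(value: str) -> str:
--     """
--     Masks all but the first and last alphanumeric characters in a string.
--     Non-alphanumeric characters (separators, punctuation) are preserved.
--     Mask char is always '*'.
--     """
--     if not value:
--         return value
--
--     # Collect indices of alphanumeric chars
--     alnum_indices = [i for i, ch in enumerate(value) if ch.isalnum()]
--
--     if len(alnum_indices) <= 2:
--         # If too short, mask all alphanumerics
--         return "".join("*" if c.isalnum() else c for c in value)
--
--     # Otherwise mask all but first + last alphanumeric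
--     masked_chars = list(value)
--     for idx in alnum_indices[1:-1]:
--         masked_chars[idx] = "*"
--
--     return "".join(masked_chars)
-- ===== SOURCE B (Python) =====
-- def format_preserving_mask(value: str) -> str:
--     """
--     Masks all but the first and last alphanumeric characters in a string.
--     Non-alphanumeric characters (separators, punctuation) are preserved.
--     Mask char is always '*'.
--     """
--     if not value:
--         return value
--
--     total = sum(1 for ch in value if ch.isalnum())
--
--     out = []
--     seen = 0
--     for ch in value:
--         if ch.isalnum():
--             if total > 2 and (seen == 0 or seen == total - 1):
--                 out.append(ch)
--             else:
--                 out.append("*")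
--             seen += 1
--         else:
--             out.append(ch)
--     return "".join(out)
-- ===== Notes on version B (the rewrite author's own statement) =====
-- stated objective: simpler
-- what changed: B drops A's alnum-index list, its [1:-1] slice and the in-place masking of a char list, and instead decides each character in one pass from a running count of alphanumerics seen versus the precomputed total.
import Mathlib
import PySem

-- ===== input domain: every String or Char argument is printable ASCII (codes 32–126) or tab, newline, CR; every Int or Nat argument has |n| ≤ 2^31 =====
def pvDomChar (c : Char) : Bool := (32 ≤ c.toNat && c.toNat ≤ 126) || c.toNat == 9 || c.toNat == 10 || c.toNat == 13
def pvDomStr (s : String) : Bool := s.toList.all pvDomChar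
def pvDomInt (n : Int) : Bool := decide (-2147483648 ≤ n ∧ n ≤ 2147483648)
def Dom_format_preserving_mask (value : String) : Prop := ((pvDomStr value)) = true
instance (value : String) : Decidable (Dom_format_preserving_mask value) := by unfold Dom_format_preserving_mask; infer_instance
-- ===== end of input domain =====

-- B replaces A's alnum-index list, [1:-1] slice and in-place masking by a single
-- pass with a running count of alphanumerics seen (objective: simpler, one traversal).

-- ===== PORT A =====
def format_preserving_mask (value : String) : String :=
  if value = "" then value
  else
    let cs := value.toList
    let alnumIndices : List Int :=
      ((PySem.List.enumerate cs 0).filter (fun p => PySem.Chars.isalnum p.2)).map (fun p => p.1)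
    if alnumIndices.length ≤ 2 then
      String.ofList (cs.map (fun c => if PySem.Chars.isalnum c then '*' else c))
    else
      String.ofList ((PySem.List.slice alnumIndices (some 1) (some (-1))).foldl
        (fun l idx => l.set idx.toNat '*') cs)

-- ===== PORT B =====
-- the `for ch in value` loop of Source B, carrying the running count `seen`
def pvAltGo (total : Nat) (seen : Nat) : List Char → List Char
  | [] => []
  | c :: rest =>
    (if PySem.Chars.isalnum c then
       (if 2 < total ∧ (seen = 0 ∨ seen = total - 1) then c else '*')
     else c)
    :: pvAltGo total (if PySem.Chars.isalnum c then seen + 1 else seen) rest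

def format_preserving_mask_alt (value : String) : String :=
  if value = "" then value
  else
    let cs := value.toList
    let total := cs.countP PySem.Chars.isalnum
    String.ofList (pvAltGo total 0 cs)

-- ===== PRECONDITION & SPEC =====
def Spec_format_preserving_mask (value : String) (out : String) : Prop := out = format_preserving_mask_alt value
instance (value : String) (out : String) : Decidable (Spec_format_preserving_mask value out) := by unfold Spec_format_preserving_mask; infer_instance

-- ===== CLAIM (what is proved, stated in full; the proofs are below) =====
def Claim_equal_format_preserving_mask : Prop := ∀ (value : String), Dom_format_preserving_mask value → Spec_format_preserving_mask value (format_preserving_mask value)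

-- ===== LEMMAS AND PROOFS =====

-- indices (0-based) of the alphanumeric characters of a list, in order
def idxList : List Char → List Nat
  | [] => []
  | c :: cs =>
    if PySem.Chars.isalnum c then 0 :: (idxList cs).map (· + 1)
    else (idxList cs).map (· + 1)

theorem idxList_length (cs : List Char) :
    (idxList cs).length = cs.countP PySem.Chars.isalnum := by
  induction cs with
  | nil => simp [idxList]
  | cons c cs ih =>
    by_cases h : PySem.Chars.isalnum c <;> simp [idxList, h, ih]

theorem idx_toNat (cs : List Char) (s : Nat) :
    ((((PySem.List.enumerate cs (s : Int)).filter (fun p => PySem.Chars.isalnum p.2)).map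
        (fun p => p.1)).map Int.toNat) = (idxList cs).map (· + s) := by
  induction cs generalizing s with
  | nil => simp [PySem.List.enumerate_nil, idxList]
  | cons c cs ih =>
    have hcast : (s : Int) + 1 = ((s + 1 : Nat) : Int) := by push_cast; ring
    rw [PySem.List.enumerate_cons, hcast]
    by_cases h : PySem.Chars.isalnum c
    · rw [List.filter_cons_of_pos (by simpa using h)]
      simp only [List.map_cons, idxList, if_pos h]
      refine congrArg₂ List.cons (by simp) ?_
      rw [ih (s + 1), List.map_map]
      congr 1
      funext n
      simp only [Function.comp_apply]
      omega
    · rw [List.filter_cons_of_neg (by simpa using h)]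
      simp only [idxList, if_neg h]
      rw [ih (s + 1), List.map_map]
      congr 1
      funext n
      simp only [Function.comp_apply]
      omega

theorem rank_cons_succ (c : Char) (cs : List Char) (i : Nat) :
    ((c :: cs).take (i + 1)).countP PySem.Chars.isalnum =
      (if PySem.Chars.isalnum c then 1 else 0) + (cs.take i).countP PySem.Chars.isalnum := by
  rw [List.take_succ_cons, List.countP_cons, Nat.add_comm]

theorem mem_window_map (L : List Nat) (a b i : Nat) :
    (i + 1) ∈ ((L.map (· + 1)).drop a).take b ↔ i ∈ (L.drop a).take b := by
  rw [← List.map_drop, ← List.map_take]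
  constructor
  · intro hm
    obtain ⟨j, hj, hji⟩ := List.mem_map.mp hm
    obtain rfl : j = i := by omega
    exact hj
  · intro hm
    exact List.mem_map.mpr ⟨i, hm, rfl⟩

theorem zero_not_mem_window_map (L : List Nat) (a b : Nat) :
    0 ∉ ((L.map (· + 1)).drop a).take b := by
  rw [← List.map_drop, ← List.map_take]
  intro hm
  obtain ⟨j, _, hji⟩ := List.mem_map.mp hm
  omega

-- membership in a drop/take window of idxList, via the running count of alnums
theorem mem_idxList_window (cs : List Char) (a b i : Nat) :
    i ∈ ((idxList cs).drop a).take b ↔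
      ∃ h : i < cs.length, PySem.Chars.isalnum cs[i] = true ∧
        a ≤ (cs.take i).countP PySem.Chars.isalnum ∧
        (cs.take i).countP PySem.Chars.isalnum < a + b := by
  induction cs generalizing a b i with
  | nil => simp [idxList]
  | cons c cs ih =>
    by_cases h : PySem.Chars.isalnum c
    · simp only [idxList, if_pos h]
      cases a with
      | zero =>
        cases b with
        | zero => simp
        | succ b =>
          rw [List.drop_zero, List.take_succ_cons]
          cases i with
          | zero =>
            constructor
            · intro _
              exact ⟨by simp, by simpa using h, by simp, by simp⟩
            · intro _
              exact List.mem_cons_self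
          | succ i =>
            have hstep : (i + 1) ∈ 0 :: ((idxList cs).map (· + 1)).take b ↔
                (i + 1) ∈ ((idxList cs).map (· + 1)).take b := by simp
            rw [hstep]
            have hw := mem_window_map (idxList cs) 0 b i
            rw [List.drop_zero] at hw
            rw [hw, ih 0 b i]
            constructor
            · rintro ⟨hlt, h1, _, h3⟩
              refine ⟨by simpa using hlt, by simpa using h1, by omega, ?_⟩
              rw [rank_cons_succ, if_pos h]
              omega
            · rintro ⟨hlt, h1, _, h3⟩
              rw [rank_cons_succ, if_pos h] at h3
              exact ⟨by simpa using hlt, by simpa using h1, by omega, by omega⟩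
      | succ a =>
        rw [List.drop_succ_cons]
        cases i with
        | zero =>
          constructor
          · intro hm
            exact absurd hm (zero_not_mem_window_map _ _ _)
          · rintro ⟨hlt, h1, h2, h3⟩
            simp only [List.take_zero, List.countP_nil] at h2
            omega
        | succ i =>
          rw [mem_window_map, ih a b i]
          constructor
          · rintro ⟨hlt, h1, h2, h3⟩
            refine ⟨by simpa using hlt, by simpa using h1, ?_, ?_⟩ <;>
              rw [rank_cons_succ, if_pos h] <;> omega
          · rintro ⟨hlt, h1, h2, h3⟩
            rw [rank_cons_succ, if_pos h] at h2 h3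
            exact ⟨by simpa using hlt, by simpa using h1, by omega, by omega⟩
    · simp only [idxList, if_neg h]
      cases i with
      | zero =>
        constructor
        · intro hm
          exact absurd hm (zero_not_mem_window_map _ _ _)
        · rintro ⟨hlt, h1, _⟩
          simp only [List.getElem_cons_zero] at h1
          exact absurd h1 (by simpa using h)
      | succ i =>
        rw [mem_window_map, ih a b i]
        constructor
        · rintro ⟨hlt, h1, h2, h3⟩
          refine ⟨by simpa using hlt, by simpa using h1, ?_, ?_⟩ <;>
            rw [rank_cons_succ, if_neg h] <;> omega
        · rintro ⟨hlt, h1, h2, h3⟩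
          rw [rank_cons_succ, if_neg h] at h2 h3
          exact ⟨by simpa using hlt, by simpa using h1, by omega, by omega⟩

theorem rank_lt_total (cs : List Char) (i : Nat) (h : i < cs.length)
    (ha : PySem.Chars.isalnum cs[i] = true) :
    (cs.take i).countP PySem.Chars.isalnum < cs.countP PySem.Chars.isalnum := by
  conv_rhs => rw [← List.take_append_drop i cs]
  rw [List.countP_append]
  have hdrop : cs.drop i = cs[i] :: cs.drop (i + 1) := (List.getElem_cons_drop h).symm
  rw [hdrop, List.countP_cons, ha, if_pos rfl]
  omega

theorem foldl_set_getElem? (S : List Int) (acc : List Char) (i : Nat) :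
    (S.foldl (fun l idx => l.set idx.toNat '*') acc)[i]? =
      (acc[i]?).map (fun c => if i ∈ S.map Int.toNat then '*' else c) := by
  induction S generalizing acc with
  | nil => simp [Option.map_id']
  | cons j S ih =>
    rw [List.foldl_cons, ih]
    by_cases hj : j.toNat = i
    · subst hj
      cases hacc : acc[j.toNat]? with
      | none =>
        have hlen : acc.length ≤ j.toNat := by
          simpa using List.getElem?_eq_none_iff.mp hacc
        rw [List.getElem?_set]
        simp [Nat.not_lt.mpr hlen]
      | some c =>
        have hlen : j.toNat < acc.length := (List.getElem?_eq_some_iff.mp hacc).1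
        rw [List.getElem?_set]
        simp [hlen]
    · have hj' : ¬ i = j.toNat := fun hh => hj hh.symm
      rw [List.getElem?_set, if_neg hj]
      by_cases hm : i ∈ S.map Int.toNat <;> simp [hm, hj']

theorem pvAltGo_getElem? (cs : List Char) (total seen i : Nat) :
    (pvAltGo total seen cs)[i]? = (cs[i]?).map (fun c =>
      if PySem.Chars.isalnum c then
        (if 2 < total ∧ (seen + (cs.take i).countP PySem.Chars.isalnum = 0 ∨
            seen + (cs.take i).countP PySem.Chars.isalnum = total - 1) then c else '*')
      else c) := by
  induction cs generalizing seen i with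
  | nil => simp [pvAltGo]
  | cons c cs ih =>
    cases i with
    | zero => simp [pvAltGo]
    | succ i =>
      simp only [pvAltGo, List.getElem?_cons_succ]
      by_cases h : PySem.Chars.isalnum c
      · rw [if_pos h, ih, rank_cons_succ, if_pos h]
        simp only [Nat.add_assoc]
      · rw [if_neg h, ih, rank_cons_succ, if_neg h]
        simp only [Nat.zero_add]

theorem pvAltGo_of_small (total : Nat) (ht : ¬ 2 < total) (seen : Nat) (cs : List Char) :
    pvAltGo total seen cs = cs.map (fun c => if PySem.Chars.isalnum c then '*' else c) := by
  induction cs generalizing seen with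
  | nil => rfl
  | cons c cs ih =>
    by_cases hc : PySem.Chars.isalnum c <;> simp [pvAltGo, hc, ht, ih]

-- ===== VERDICT (by name: the statement is the Claim_ definition above) =====
theorem format_preserving_mask_spec : Claim_equal_format_preserving_mask := by
  intro value _
  unfold Spec_format_preserving_mask format_preserving_mask format_preserving_mask_alt
  by_cases hv : value = ""
  · simp [hv]
  · simp only [hv, ite_false]
    set cs := value.toList with hcs
    set idxs : List Int :=
      ((PySem.List.enumerate cs 0).filter (fun p => PySem.Chars.isalnum p.2)).map
        (fun p => p.1) with hidxs
    have hmap : idxs.map Int.toNat = idxList cs := by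
      have := idx_toNat cs 0
      simpa [hidxs] using this
    have hlen : idxs.length = cs.countP PySem.Chars.isalnum := by
      have := congrArg List.length hmap
      simpa [idxList_length] using this
    by_cases hsmall : idxs.length ≤ 2
    · rw [if_pos hsmall, pvAltGo_of_small _ (by omega)]
    · rw [if_neg hsmall]
      have htot3 : 2 < cs.countP PySem.Chars.isalnum := by omega
      congr 1
      apply List.ext_getElem?
      intro i
      rw [foldl_set_getElem?, pvAltGo_getElem?]
      have hslice : PySem.List.slice idxs (some 1) (some (-1)) =
          (idxs.drop 1).take (idxs.length - 2) := by
        unfold PySem.List.slice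
        show (idxs.drop (PySem.List.clampIdx idxs.length 1)).take
            (PySem.List.clampIdx idxs.length (-1) - PySem.List.clampIdx idxs.length 1) = _
        rw [PySem.List.clampIdx_neg_one,
          show ((1 : Int)) = ((1 : Nat) : Int) by norm_num, PySem.List.clampIdx_natCast]
        have hmin : min 1 idxs.length = 1 := by omega
        rw [hmin]
        congr 1
      have hwin : (PySem.List.slice idxs (some 1) (some (-1))).map Int.toNat =
          ((idxList cs).drop 1).take (idxs.length - 2) := by
        rw [hslice, List.map_take, List.map_drop, hmap]
      simp only [hwin]
      cases hci : cs[i]? with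
      | none => simp
      | some c =>
        have hic : i < cs.length := (List.getElem?_eq_some_iff.mp hci).1
        have hval : cs[i] = c := (List.getElem?_eq_some_iff.mp hci).2
        have hai' : PySem.Chars.isalnum cs[i] = PySem.Chars.isalnum c := by rw [hval]
        simp only [Option.map_some, Option.some_inj]
        by_cases hmem : i ∈ ((idxList cs).drop 1).take (idxs.length - 2)
        · rw [if_pos hmem]
          obtain ⟨_, ha, h2, h3⟩ := (mem_idxList_window cs 1 (idxs.length - 2) i).mp hmem
          rw [hai'] at ha
          rw [if_pos ha, if_neg]
          rintro ⟨_, hfl⟩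
          rcases hfl with h0 | h1 <;> omega
        · rw [if_neg hmem]
          by_cases hai : PySem.Chars.isalnum c
          · have hrlt := rank_lt_total cs i hic (by rw [hai']; exact hai)
            rw [if_pos hai, if_pos]
            refine ⟨htot3, ?_⟩
            by_contra hfl
            push Not at hfl
            exact hmem ((mem_idxList_window cs 1 (idxs.length - 2) i).mpr
              ⟨hic, by rw [hai']; exact hai, by omega, by omega⟩)
          · rw [if_neg hai]
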